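-- pv_equiv track=rewrite | github.com/paulmeritt/Kyrios | learning/learning_alg_base.py | _get_sentiment_score
-- ===== SOURCE A (Python) =====
-- def _get_sentiment_score(message):
--     """
--     Placeholder function to calculate sentiment score. Can be replaced with an NLP model.
--     """
--     positive_words = ["good", "happy", "joy", "positive", "great"]
--     negative_words = ["bad", "sad", "anger", "negative", "poor"]
--     sentiment_score = 0
--     for word in positive_words:
--         sentiment_score += message.lower().count(word)
--     for word in negative_words:
--         sentiment_score -= message.lower().count(word)
--     return sentiment_score
-- ===== SOURCE B (Python) =====
-- def _get_sentiment_score(message):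
--     """Single left-to-right pass: at each position add the sign of any keyword starting there."""
--     signs = {"good": 1, "happy": 1, "joy": 1, "positive": 1, "great": 1,
--              "bad": -1, "sad": -1, "anger": -1, "negative": -1, "poor": -1}
--     text = message.lower()
--     total = 0
--     for i in range(len(text)):
--         for word, sign in signs.items():
--             if text.startswith(word, i):
--                 total += sign
--     return total
-- ===== Notes on version B (the rewrite author's own statement) =====
-- stated objective: alternative
-- what changed: Replaces ten separate str.count scans over the lowered message with one left-to-right pass that, at each position, adds the sign of any keyword starting there (valid because no keyword has a nontrivial border or is a prefix of another).
import Mathlib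
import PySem

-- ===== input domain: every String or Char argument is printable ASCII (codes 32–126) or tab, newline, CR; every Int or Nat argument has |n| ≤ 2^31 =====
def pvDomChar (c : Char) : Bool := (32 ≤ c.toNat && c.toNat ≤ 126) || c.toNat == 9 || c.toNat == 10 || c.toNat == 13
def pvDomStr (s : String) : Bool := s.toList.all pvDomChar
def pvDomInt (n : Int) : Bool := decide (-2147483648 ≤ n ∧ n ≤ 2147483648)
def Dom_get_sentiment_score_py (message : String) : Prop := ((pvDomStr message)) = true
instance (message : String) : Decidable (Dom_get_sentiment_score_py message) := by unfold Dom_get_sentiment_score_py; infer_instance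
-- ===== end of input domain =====

-- B replaces ten separate str.count scans with one left-to-right pass adding each keyword's sign
-- at every position where it starts (same cost; a different, single-pass algorithm).


-- ===== PORT A =====
def get_sentiment_score_py (message : String) : Int :=
  let positive_words : List String := ["good", "happy", "joy", "positive", "great"]
  let negative_words : List String := ["bad", "sad", "anger", "negative", "poor"]
  let sentiment_score : Int := 0
  let sentiment_score := positive_words.foldl
    (fun acc word => acc + (PySem.Str.count (PySem.Str.lower message) word : Int)) sentiment_score
  let sentiment_score := negative_words.foldl
    (fun acc word => acc - (PySem.Str.count (PySem.Str.lower message) word : Int)) sentiment_score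
  sentiment_score

-- ===== PORT B =====
-- the dict of Source B as an association list word ↦ sign
def pvSigns : List (List Char × Int) :=
  [("good".toList, 1), ("happy".toList, 1), ("joy".toList, 1), ("positive".toList, 1),
   ("great".toList, 1), ("bad".toList, -1), ("sad".toList, -1), ("anger".toList, -1),
   ("negative".toList, -1), ("poor".toList, -1)]

-- Source B's outer loop over positions i = one structural pass over the suffixes of the lowered text;
-- the inner loop over signs.items() is the fold at each position
def pvScan : List Char → Int
  | [] => 0
  | c :: t =>
      (pvSigns.foldl (fun acc ws => if ws.1.isPrefixOf (c :: t) then acc + ws.2 else acc) 0)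
        + pvScan t

def get_sentiment_score_py_alt (message : String) : Int :=
  pvScan (PySem.Str.lower message).toList

-- ===== PRECONDITION & SPEC =====
def Spec_get_sentiment_score_py (message : String) (out : Int) : Prop := out = get_sentiment_score_py_alt message
instance (message : String) (out : Int) : Decidable (Spec_get_sentiment_score_py message out) := by unfold Spec_get_sentiment_score_py; infer_instance

-- ===== CLAIM (what is proved, stated in full; the proofs are below) =====
def Claim_equal_get_sentiment_score_py : Prop := ∀ (message : String), Dom_get_sentiment_score_py message → Spec_get_sentiment_score_py message (get_sentiment_score_py message)

-- ===== LEMMAS AND PROOFS =====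

-- number of positions in l at which w starts (possibly overlapping)
def pvCountPref (w : List Char) : List Char → Nat
  | [] => 0
  | c :: t => (if w.isPrefixOf (c :: t) then 1 else 0) + pvCountPref w t

-- the scan splits into one overlapping-position count per keyword
theorem pvFold_split (m t : List Char) :
    ∀ (L : List (List Char × Int)) (a1 a2 : Int),
      (∀ ws : List Char × Int, pvCountPref ws.1 m
          = (if ws.1.isPrefixOf m then 1 else 0) + pvCountPref ws.1 t) →
      L.foldl (fun acc ws => if ws.1.isPrefixOf m then acc + ws.2 else acc) a1
        + L.foldl (fun acc ws => acc + ws.2 * (pvCountPref ws.1 t : Int)) a2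
      = L.foldl (fun acc ws => acc + ws.2 * (pvCountPref ws.1 m : Int)) (a1 + a2) := by
  intro L
  induction L with
  | nil => intro a1 a2 _; simp [List.foldl]
  | cons ws rest ih =>
    intro a1 a2 hstep
    simp only [List.foldl]
    rw [ih _ _ hstep]
    congr 1
    rw [hstep ws]
    split_ifs <;> push_cast <;> ring

theorem pvScan_eq_sum (l : List Char) :
    pvScan l = pvSigns.foldl (fun acc ws => acc + ws.2 * (pvCountPref ws.1 l : Int)) 0 := by
  induction l with
  | nil => simp [pvScan, pvSigns, pvCountPref]
  | cons c t ih =>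
    rw [pvScan, ih]
    have := pvFold_split (c :: t) t pvSigns 0 0 (fun ws => by simp [pvCountPref])
    simpa using this

def pvBorderFree (w : List Char) : Bool :=
  (List.range w.length).all fun k => k == 0 || !(List.isPrefixOf (w.drop k) w)

theorem pvBorderFree_no_inner (w l : List Char) (hbf : pvBorderFree w = true)
    (hp : w.isPrefixOf l = true) (k : Nat) (hk0 : 0 < k) (hkw : k < w.length) :
    w.isPrefixOf (l.drop k) = false := by
  by_contra h
  have h2 : w <+: l.drop k := by
    simpa [List.isPrefixOf_iff_prefix] using (eq_true_of_ne_false h)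
  have h1 : w <+: l := by simpa [List.isPrefixOf_iff_prefix] using hp
  obtain ⟨r, hr⟩ := h1
  subst hr
  have hdrop : (w ++ r).drop k = w.drop k ++ r := List.drop_append_of_le_length (le_of_lt hkw)
  rw [hdrop] at h2
  obtain ⟨r2, hr2⟩ := h2
  have hlen : (w.drop k).length ≤ w.length := by simp
  have hin : w.drop k <+: w := by
    have hcong := congrArg (List.take (w.drop k).length) hr2
    rw [List.take_append_of_le_length hlen, List.take_left] at hcong
    exact hcong ▸ List.take_prefix _ w
  have hb := hbf
  unfold pvBorderFree at hb
  rw [List.all_eq_true] at hb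
  have hk := hb k (List.mem_range.mpr hkw)
  simp only [Bool.or_eq_true, beq_iff_eq, Bool.not_eq_true'] at hk
  have hfalse : (w.drop k).isPrefixOf w = false := by
    rcases hk with h0 | hf
    · omega
    · exact hf
  rw [(List.isPrefixOf_iff_prefix).mpr hin] at hfalse
  simp at hfalse

-- stepping lemma: for nonempty w, one position at a time
theorem pvCountPref_step (w m : List Char) (hw : w ≠ []) :
    pvCountPref w m = (if w.isPrefixOf m then 1 else 0) + pvCountPref w (m.drop 1) := by
  cases m with
  | nil =>
    cases w with
    | nil => exact absurd rfl hw
    | cons a b => simp [pvCountPref, List.isPrefixOf]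
  | cons c t => simp [pvCountPref]

-- inside a border-free match the next |w|-1 positions contribute nothing
theorem pvCountPref_skip (w l : List Char) (hw : w ≠ []) (hbf : pvBorderFree w = true)
    (hp : w.isPrefixOf l = true) :
    ∀ n k, k + n = w.length → 0 < k → pvCountPref w (l.drop k) = pvCountPref w (l.drop w.length) := by
  intro n
  induction n with
  | zero =>
    intro k hk _
    rw [show k = w.length from by omega]
  | succ n ih =>
    intro k hk hk0
    have hkw : k < w.length := by omega
    rw [pvCountPref_step w _ hw, pvBorderFree_no_inner w l hbf hp k hk0 hkw]
    simp only [Bool.false_eq_true, if_false, Nat.zero_add, List.drop_drop]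
    have := ih (k + 1) (by omega) (by omega)
    simpa [Nat.add_comm] using this

-- the overlapping-position count equals Python's non-overlapping str.count for border-free w
theorem pvGo_eq (w : List Char) (hw : w ≠ []) (hbf : pvBorderFree w = true) :
    ∀ fuel l acc, l.length ≤ fuel →
      PySem.Chars.count.go w fuel l acc = acc + pvCountPref w l := by
  intro fuel
  induction fuel with
  | zero =>
    intro l acc hl
    have : l = [] := List.eq_nil_of_length_eq_zero (by omega)
    subst this
    simp [PySem.Chars.count.go, pvCountPref]
  | succ fuel ih =>
    intro l acc hl
    cases l with
    | nil => simp [PySem.Chars.count.go, pvCountPref]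
    | cons c t =>
      rw [PySem.Chars.count.go]
      by_cases hp : w.isPrefixOf (c :: t) = true
      · rw [if_pos hp]
        have hwlen : 0 < w.length := List.length_pos_of_ne_nil hw
        have hdl : ((c :: t).drop w.length).length ≤ fuel := by
          simp only [List.length_drop]
          simp at hl ⊢; omega
        rw [ih _ _ hdl]
        have hstep : pvCountPref w (c :: t)
            = 1 + pvCountPref w ((c :: t).drop w.length) := by
          by_cases h1 : w.length = 1
          · rw [pvCountPref_step w _ hw, if_pos hp, h1]
          · have hsk := pvCountPref_skip w (c :: t) hw hbf hp (w.length - 1) 1 (by omega) (by omega)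
            rw [pvCountPref_step w _ hw, if_pos hp, hsk]
        omega
      · rw [if_neg hp]
        have heq : pvCountPref w (c :: t) = pvCountPref w t := by
          simp [pvCountPref, hp]
        rw [ih t acc (by simp at hl ⊢; omega), heq]

theorem pvCount_eq (w : List Char) (hw : w ≠ []) (hbf : pvBorderFree w = true) (l : List Char) :
    PySem.Chars.count l w = pvCountPref w l := by
  rw [PySem.Chars.count]
  rw [if_neg (by simpa [List.isEmpty_iff] using hw)]
  simpa using pvGo_eq w hw hbf l.length l 0 (le_refl _)

-- ===== VERDICT (by name: the statement is the Claim_ definition above) =====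
theorem get_sentiment_score_py_spec : Claim_equal_get_sentiment_score_py := by
  intro message _
  unfold Spec_get_sentiment_score_py get_sentiment_score_py get_sentiment_score_py_alt
  rw [pvScan_eq_sum]
  have hc : ∀ w : String, PySem.Str.count (PySem.Str.lower message) w
      = PySem.Chars.count (PySem.Str.lower message).toList w.toList := by
    intro w; simp [PySem.Str.count_eq]
  simp only [pvSigns, List.foldl]
  rw [hc, hc, hc, hc, hc, hc, hc, hc, hc, hc]
  rw [pvCount_eq "good".toList (by decide) (by decide),
      pvCount_eq "happy".toList (by decide) (by decide),
      pvCount_eq "joy".toList (by decide) (by decide),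
      pvCount_eq "positive".toList (by decide) (by decide),
      pvCount_eq "great".toList (by decide) (by decide),
      pvCount_eq "bad".toList (by decide) (by decide),
      pvCount_eq "sad".toList (by decide) (by decide),
      pvCount_eq "anger".toList (by decide) (by decide),
      pvCount_eq "negative".toList (by decide) (by decide),
      pvCount_eq "poor".toList (by decide) (by decide)]
  push_cast
  ring
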